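-- pv_equiv track=rewrite | github.com/stalj/pp1 | 04-Subroutines/zadanie44.py | f
-- ===== SOURCE A (Python) =====
-- def f(password):
--     sum = 0
--     character_count = {}
--     for i in password:
--         if i in character_count:
--             character_count[i]+=1
--         else:
--             character_count[i] = 1
--     for i, count in character_count.items():
--         if count ==1:
--             sum +=1
--     if sum < 6:
--         return False
--     else:
--         return True
-- ===== SOURCE B (Python) =====
-- def _singles(s):
--     # s is sorted: equal characters form contiguous runs; count runs of length 1
--     if not s:
--         return 0
--     x = s[0]
--     rest = s[1:]
--     k = 0
--     while k < len(rest) and rest[k] == x: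
--         k += 1
--     return (1 if k == 0 else 0) + _singles(rest[k:])
--
-- def f(password):
--     return _singles(sorted(password)) >= 6
-- ===== Notes on version B (the rewrite author's own statement) =====
-- stated objective: alternative
-- what changed: B sorts the password and counts maximal runs of length 1 with a run-skipping recursive scan over the sorted list, instead of A's single pass that builds a character-frequency dictionary and then counts entries equal to 1.
import Mathlib
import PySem

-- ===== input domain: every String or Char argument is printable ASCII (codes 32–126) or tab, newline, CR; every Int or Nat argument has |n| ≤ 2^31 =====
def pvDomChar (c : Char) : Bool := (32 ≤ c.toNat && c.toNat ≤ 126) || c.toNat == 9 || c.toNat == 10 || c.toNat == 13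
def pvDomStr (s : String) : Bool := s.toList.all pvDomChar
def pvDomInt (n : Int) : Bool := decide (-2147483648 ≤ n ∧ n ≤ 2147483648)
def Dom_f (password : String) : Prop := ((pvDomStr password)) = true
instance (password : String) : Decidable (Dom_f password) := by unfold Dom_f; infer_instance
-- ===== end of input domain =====

-- B sorts the password and counts maximal runs of length 1 by a run-skipping recursion,
-- replacing A's frequency-dictionary tabulation (alternative algorithm, same result).

-- ===== PORT A =====
def f (password : String) : Bool :=
  let character_count : PySem.Dict Char Int :=
    password.toList.foldl
      (fun d i => if d.contains i then d.modify i 0 (· + 1) else d.insert i 1)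
      PySem.Dict.empty
  let sum : Int :=
    character_count.items.foldl
      (fun s p => if p.2 == (1 : Int) then s + 1 else s) 0
  if sum < 6 then false else true

-- ===== PORT B =====
-- _singles: the inner while loop advances k over the run of s[0]; here the run prefix is
-- rest.takeWhile (· == x) (its length is the final k) and rest[k:] is rest.dropWhile (· == x).
def pvSingles : List Char → Int
  | [] => 0
  | x :: rest =>
      (if (rest.takeWhile (fun c => c == x)).length = 0 then (1 : Int) else 0) +
      pvSingles (rest.dropWhile (fun c => c == x))
termination_by s => s.length
decreasing_by
  simpa using Nat.lt_succ_of_le (List.length_dropWhile_le _ _)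

def f_alt (password : String) : Bool :=
  decide ((6 : Int) ≤ pvSingles (PySem.List.sorted password.toList (fun c => c) false))

-- ===== PRECONDITION & SPEC =====
def Spec_f (password : String) (out : Bool) : Prop := out = f_alt password
instance (password : String) (out : Bool) : Decidable (Spec_f password out) := by unfold Spec_f; infer_instance

-- ===== CLAIM (what is proved, stated in full; the proofs are below) =====
def Claim_equal_f : Prop := ∀ (password : String), Dom_f password → Spec_f password (f password)

-- ===== LEMMAS AND PROOFS =====

-- A's build loop is exactly Counter(password): the missing-key branch equals modify with default 0.
theorem pv_step_eq (d : PySem.Dict Char Int) (i : Char) :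
    (if d.contains i then d.modify i 0 (· + 1) else d.insert i 1) = d.modify i 0 (· + 1) := by
  by_cases h : d.contains i
  · simp [h]
  · have hg : d.get? i = none := by
      rw [PySem.Dict.get?_eq_none_iff_contains]; simpa using h
    simp [h, PySem.Dict.modify, PySem.Dict.getD, hg]

theorem pv_dict_eq (l : List Char) :
    l.foldl (fun d i => if d.contains i then d.modify i 0 (· + 1) else d.insert i 1)
      PySem.Dict.empty = PySem.Dict.counter l := by
  rw [PySem.Dict.counter_eq_foldl]
  simp only [pv_step_eq]

-- A's second loop counts the distinct characters of multiplicity 1.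
theorem pv_a_countP (l : List Char) :
    ((PySem.Dict.counter l).items.foldl
        (fun s p => if p.2 == (1 : Int) then s + 1 else s) (0 : Int))
      = ((PySem.Set.ofList l).countP (fun c => l.count c == 1) : Int) := by
  rw [PySem.Dict.items_counter, List.foldl_map]
  have := PySem.List.foldl_if_add_one (fun c => l.count c == 1) (PySem.Set.ofList l) 0
  simp only [zero_add] at this
  rw [← this]
  apply PySem.List.foldl_congr_mem
  intro acc c _
  by_cases h : l.count c = 1
  · simp [h]
  · have : ¬ ((l.count c : Int) = 1) := by exact_mod_cast h
    simp [h, this]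

-- on a sorted list, the run-skipping scan counts the distinct characters of multiplicity 1
theorem pv_singles_eq (m : List Char) (hs : m.Pairwise (fun a b => a ≤ b)) :
    pvSingles m = ((PySem.Set.ofList m).countP (fun c => m.count c == 1) : Int) := by
  induction m using pvSingles.induct with
  | case1 => simp [pvSingles]
  | case2 x rest ih =>
      set t := rest.takeWhile (fun c => c == x) with ht
      set d := rest.dropWhile (fun c => c == x) with hd
      have hrest : rest = t ++ d := (List.takeWhile_append_dropWhile).symm
      have htx : ∀ e ∈ t, e = x := by
        intro e he
        have := List.mem_takeWhile_imp he
        simpa using this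
      have hpd : d.Pairwise (fun a b => a ≤ b) :=
        (List.Pairwise.sublist (List.dropWhile_sublist _) hs.of_cons)
      have hxd : x ∉ d := by
        intro hmem
        cases hdd : d with
        | nil => simp [hdd] at hmem
        | cons y d' =>
          have hy : ¬ (y == x) = true := by
            have := List.head?_dropWhile_not (fun c => c == x) rest
            rw [← hd, hdd] at this
            simpa using this
          have hyx : y ≠ x := by simpa using hy
          have hxy : x ≤ y :=
            List.rel_of_pairwise_cons hs (by rw [hrest, hdd]; simp)
          have hlt : x < y := lt_of_le_of_ne hxy (fun h => hyx h.symm)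
          rw [hdd] at hmem
          rcases List.mem_cons.mp hmem with h | h
          · exact hyx h.symm
          · have hpd' : (y :: d').Pairwise (fun a b => a ≤ b) := hdd ▸ hpd
            exact absurd (lt_of_lt_of_le hlt (List.rel_of_pairwise_cons hpd' h))
              (lt_irrefl x)
      have hcountx : (x :: rest).count x = 1 + t.length := by
        rw [hrest]
        simp only [List.count_cons_self, List.count_append]
        have h1 : t.count x = t.length := by
          rw [List.count_eq_length]
          intro a ha; exact ((htx a ha) ▸ rfl)
        have h2 : d.count x = 0 := List.count_eq_zero.mpr hxd
        omega
      have hcountc : ∀ c ∈ d, (x :: rest).count c = d.count c := by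
        intro c hc
        have hcx : c ≠ x := fun h => hxd (h ▸ hc)
        rw [hrest]
        simp only [List.count_append, List.count_cons]
        have h1 : t.count c = 0 := by
          rw [List.count_eq_zero]
          intro h; exact hcx (htx c h)
        simp [h1, Ne.symm hcx]
      -- Set.ofList (x :: rest) is a permutation of x :: Set.ofList d
      have hperm : (PySem.Set.ofList (x :: rest)).Perm (x :: PySem.Set.ofList d) := by
        apply (List.perm_ext_iff_of_nodup (PySem.Set.nodup_ofList _) _).mpr
        · intro a
          simp only [PySem.Set.mem_ofList, List.mem_cons, hrest, List.mem_append]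
          constructor
          · rintro (h | h | h)
            exacts [Or.inl h, Or.inl (htx a h), Or.inr h]
          · rintro (h | h)
            exacts [Or.inl h, Or.inr (Or.inr h)]
        · exact List.nodup_cons.mpr ⟨by simpa using hxd, PySem.Set.nodup_ofList _⟩
      have hcount := hperm.countP_eq (fun c => (x :: rest).count c == 1)
      rw [hcount]
      have hcongr : (PySem.Set.ofList d).countP (fun c => (x :: rest).count c == 1)
          = (PySem.Set.ofList d).countP (fun c => d.count c == 1) := by
        apply List.countP_congr
        intro c hc
        rw [hcountc c ((PySem.Set.mem_ofList _ _).mp hc)]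
      rw [List.countP_cons, hcongr]
      push_cast
      rw [← ih hpd, pvSingles]
      rw [← ht, ← hd]
      -- the head contributes 1 iff the run has length 1, i.e. t = []
      by_cases hT : t.length = 0
      · have hx1 : ((x :: rest).count x == 1) = true := by
          simp [hcountx, hT]
        simp only [hT, if_true, hx1]
        ring
      · have hx1 : ((x :: rest).count x == 1) = false := by
          rw [beq_eq_false_iff_ne, hcountx]
          omega
        simp only [hT, if_false, hx1]
        push_cast; ring

theorem f_eq (password : String) : f password = f_alt password := by
  unfold f f_alt
  dsimp only
  rw [pv_dict_eq, pv_a_countP]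
  set l := password.toList with hl
  set m := PySem.List.sorted l (fun c => c) false with hm
  have hperm : m.Perm l := PySem.List.sorted_perm l (fun c => c) false
  have hsorted : m.Pairwise (fun a b => a ≤ b) := by
    simpa using PySem.List.sorted_pairwise l (fun c => c)
  rw [pv_singles_eq m hsorted]
  have hsets : (PySem.Set.ofList m).Perm (PySem.Set.ofList l) := by
    apply (List.perm_ext_iff_of_nodup (PySem.Set.nodup_ofList _) (PySem.Set.nodup_ofList _)).mpr
    intro a
    simp only [PySem.Set.mem_ofList]
    exact hperm.mem_iff
  have hcongr : (PySem.Set.ofList m).countP (fun c => m.count c == 1)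
      = (PySem.Set.ofList m).countP (fun c => l.count c == 1) := by
    apply List.countP_congr
    intro c _
    rw [hperm.count_eq]
  rw [hcongr, hsets.countP_eq]
  set s : Int := ((PySem.Set.ofList l).countP (fun c => l.count c == 1) : Int)
  by_cases h : s < 6
  · simp only [h, if_true]
    symm; simpa using by omega
  · simp only [h, if_false]
    symm; simpa using by omega

-- ===== VERDICT (by name: the statement is the Claim_ definition above) =====
theorem f_spec : Claim_equal_f := by
  intro password _
  unfold Spec_f
  exact f_eq password
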